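-- pv_equiv track=rewrite | github.com/Siam344/SwinburneUniversity | SWE30009/Assignment 3/SUT/MUTANTS/mutated_functions.py | mutant24
-- ===== SOURCE A (Python) =====
-- def mutant24(arr):
--     n = len(arr)
--     for i in range(n):
--         swapped = False
--         for j in range(0, n - i - 1):
--             if arr[j] % 3 == 0 and arr[j + 1] % 3 == 0 and arr[j] > arr[j + 1]:  # Swap only if both elements are divisible by 3
--                 arr[j], arr[j + 1] = arr[j + 1], arr[j]
--                 swapped = True
--         if not swapped:
--             break
--     return arr
-- ===== SOURCE B (Python) =====
-- def mutant24(arr):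
--     # Sort each maximal contiguous run of multiples of 3 in place (same mutation as A).
--     n = len(arr)
--     i = 0
--     while i < n:
--         if arr[i] % 3 == 0:
--             j = i + 1
--             while j < n and arr[j] % 3 == 0:
--                 j += 1
--             arr[i:j] = sorted(arr[i:j])
--             i = j
--         else:
--             i += 1
--     return arr
-- ===== Notes on version B (the rewrite author's own statement) =====
-- stated objective: faster
-- what changed: A's repeated bubble passes (swapping adjacent elements only when both are divisible by 3) are replaced by a single left-to-right scan that sorts each maximal contiguous run of multiples of 3 once with sorted().
import Mathlib
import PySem

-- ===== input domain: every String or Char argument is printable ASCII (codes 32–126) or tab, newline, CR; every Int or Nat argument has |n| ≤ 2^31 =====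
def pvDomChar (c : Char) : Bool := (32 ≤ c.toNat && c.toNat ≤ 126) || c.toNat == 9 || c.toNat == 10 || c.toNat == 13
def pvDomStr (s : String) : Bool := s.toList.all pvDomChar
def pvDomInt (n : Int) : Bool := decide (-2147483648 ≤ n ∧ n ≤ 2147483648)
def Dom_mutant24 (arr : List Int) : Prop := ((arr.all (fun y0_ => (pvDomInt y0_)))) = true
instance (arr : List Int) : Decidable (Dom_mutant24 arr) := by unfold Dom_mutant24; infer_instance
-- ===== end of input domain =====

-- B replaces A's bubble sort over adjacent multiples of 3 by sorting each maximal contiguous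
-- run of multiples of 3 once; same return value (both Pythons also mutate arr in place to the
-- same final content).

-- divisibility-by-3 test shared by both ports (Python `v % 3 == 0`)
def d3 (v : Int) : Bool := PySem.Int.mod v 3 == 0

-- ===== PORT A =====
-- swap condition of A's inner loop
def cnd (a b : Int) : Bool := d3 a && d3 b && decide (a > b)

-- one step of the inner `for j in range(0, n-i-1)` loop: conditional adjacent swap at j
def stepA (st : List Int × Bool) (j : Nat) : List Int × Bool :=
  if cnd (st.1.getD j 0) (st.1.getD (j + 1) 0) then
    ((st.1.set j (st.1.getD (j + 1) 0)).set (j + 1) (st.1.getD j 0), true)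
  else st

-- the inner loop: j over range(n-i-1), state = (arr, swapped) with swapped initially False
def innerA (arr : List Int) (m : Nat) : List Int × Bool :=
  (List.range m).foldl stepA (arr, false)

-- the outer `for i in range(n)` loop with its break, as fuel recursion; fuel = n - i,
-- so the inner bound n - i - 1 is fuel - 1
def outerA : Nat → List Int → List Int
  | 0, arr => arr
  | k + 1, arr =>
    let st := innerA arr k
    if st.2 then outerA k st.1 else st.1

def mutant24 (arr : List Int) : List Int := outerA arr.length arr

-- ===== PORT B =====
-- B: pull off a maximal run of multiples of 3 (the inner scan of Source B) and sort it;
-- elements not divisible by 3 are copied through unchanged.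
def mutant24_alt : List Int → List Int
  | [] => []
  | x :: t =>
    if d3 x then
      PySem.List.sorted (x :: t.takeWhile d3) (fun v => v) false
        ++ mutant24_alt (t.dropWhile d3)
    else x :: mutant24_alt t
  termination_by xs => xs.length
  decreasing_by
  · simpa using Nat.lt_succ_of_le (List.length_dropWhile_le d3 t)
  · simp

-- ===== PRECONDITION & SPEC =====
def Spec_mutant24 (arr : List Int) (out : List Int) : Prop := out = mutant24_alt arr
instance (arr : List Int) (out : List Int) : Decidable (Spec_mutant24 arr out) := by unfold Spec_mutant24; infer_instance

-- ===== CLAIM (what is proved, stated in full; the proofs are below) =====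
def Claim_equal_mutant24 : Prop := ∀ (arr : List Int), Dom_mutant24 arr → Spec_mutant24 arr (mutant24 arr)

-- ===== LEMMAS AND PROOFS =====

-- shorthand for Python's sorted() on Ints
def ssort (xs : List Int) : List Int := PySem.List.sorted xs (fun v => v) false

-- structural model of A's inner loop: budget-limited conditional-swap pass
def bpass : Nat → List Int → List Int × Bool
  | 0, xs => (xs, false)
  | _ + 1, [] => ([], false)
  | _ + 1, [x] => ([x], false)
  | m + 1, x :: y :: t =>
    if cnd x y then (y :: (bpass m (x :: t)).1, true)
    else (x :: (bpass m (y :: t)).1, (bpass m (y :: t)).2)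

-- structural model of A's outer loop
def loopB : Nat → List Int → List Int
  | 0, xs => xs
  | k + 1, xs => if (bpass k xs).2 then loopB k (bpass k xs).1 else (bpass k xs).1

-- maximal-run decomposition (proof-side mirror of B)
def chunks : List Int → List (List Int)
  | [] => []
  | x :: t =>
    if d3 x then (x :: t.takeWhile d3) :: chunks (t.dropWhile d3)
    else [x] :: chunks t
  termination_by xs => xs.length
  decreasing_by
  · simpa using Nat.lt_succ_of_le (List.length_dropWhile_le d3 t)
  · simp

def allD3 (c : List Int) : Prop := ∀ a ∈ c, d3 a = true
def okC (c : List Int) : Prop := c ≠ [] ∧ (allD3 c ∨ ∃ a, c = [a] ∧ d3 a = false)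
def NB (c c' : List Int) : Prop := (∃ a ∈ c, d3 a = false) ∨ (∃ a ∈ c', d3 a = false)
def Good (cs : List (List Int)) : Prop := (∀ c ∈ cs, okC c) ∧ cs.IsChain NB
def SepC (c rest : List Int) : Prop :=
  ∀ b, rest.head? = some b → d3 b = false ∨ ∃ a, c.getLast? = some a ∧ d3 a = false

-- per-chunk suffix invariant: the tail beyond position m+1 already sits in sorted position
def Inv1 (m : Nat) (c : List Int) : Prop := ssort c = ssort (c.take (m + 1)) ++ c.drop (m + 1)

def cpass (m : Nat) : List (List Int) → List (List Int) × Bool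
  | [] => ([], false)
  | c :: cs =>
    ((bpass m c).1 :: (cpass (m - c.length) cs).1,
     (bpass m c).2 || (cpass (m - c.length) cs).2)

def ChunkInv : Nat → List (List Int) → Prop
  | _, [] => True
  | m, c :: cs => Inv1 m c ∧ ChunkInv (m - c.length) cs

theorem bpass_nil (m : Nat) : bpass m [] = ([], false) := by cases m <;> rfl
theorem bpass_single (m : Nat) (x : Int) : bpass m [x] = ([x], false) := by cases m <;> rfl

theorem bpass_perm (m : Nat) (xs : List Int) : (bpass m xs).1.Perm xs := by
  induction m generalizing xs with
  | zero => simp [bpass]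
  | succ m ih =>
    match xs with
    | [] => simp [bpass]
    | [x] => simp [bpass]
    | x :: y :: t =>
      simp only [bpass]
      split
      · exact ((ih (x :: t)).cons y).trans (List.Perm.swap x y t)
      · exact (ih (y :: t)).cons x

theorem bpass_length (m : Nat) (xs : List Int) : (bpass m xs).1.length = xs.length :=
  (bpass_perm m xs).length_eq

theorem ssort_perm_eq {xs ys : List Int} (h : xs.Perm ys) : ssort xs = ssort ys :=
  PySem.List.sorted_eq_sorted_of_perm xs ys (fun v => v) (fun _ _ h => h) h

theorem ssort_pairwise (xs : List Int) : (ssort xs).Pairwise (· ≤ ·) :=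
  PySem.List.sorted_pairwise xs (fun v => v)

theorem ssort_perm (xs : List Int) : (ssort xs).Perm xs :=
  PySem.List.sorted_perm xs (fun v => v) false

theorem ssort_self {xs : List Int} (h : xs.Pairwise (· ≤ ·)) : ssort xs = xs :=
  PySem.List.sorted_eq_self_of_pairwise xs (fun v => v) h

theorem ssort_singleton (x : Int) : ssort [x] = [x] := ssort_self (List.pairwise_singleton _ _)

theorem ssort_append_max {w : List Int} {M : Int} (h : ∀ a ∈ w, a ≤ M) :
    ssort (w ++ [M]) = ssort w ++ [M] := by
  refine PySem.List.sorted_id_eq_of_perm_of_pairwise _ _ ((ssort_perm w).append_right [M]) ?_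
  refine List.pairwise_append.2 ⟨ssort_pairwise w, List.pairwise_singleton _ _, ?_⟩
  intro a ha b hb
  rw [List.mem_singleton] at hb
  exact hb ▸ h a ((ssort_perm w).mem_iff.1 ha)

-- budget overflow: extra budget beyond the list's length changes nothing
theorem bpass_overflow (m : Nat) (xs : List Int) (h : xs.length ≤ m + 1) :
    bpass m xs = bpass (xs.length - 1) xs := by
  induction m generalizing xs with
  | zero =>
    match xs with
    | [] => rfl
    | [x] => rfl
    | x :: y :: t => simp at h
  | succ m ih =>
    match xs with
    | [] => simp [bpass_nil]
    | [x] => simp [bpass_single]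
    | x :: y :: t =>
      have hl : t.length + 2 ≤ m + 2 := by simpa using h
      have h1 : (x :: t).length ≤ m + 1 := by simp; omega
      have h2 : (y :: t).length ≤ m + 1 := by simp; omega
      simp only [bpass, List.length_cons, Nat.add_sub_cancel]
      rw [ih (x :: t) h1, ih (y :: t) h2]
      simp

-- the budget exhausts inside the prefix u: the suffix v is untouched
theorem bpass_split (m : Nat) (u v : List Int) (h : m + 1 ≤ u.length) :
    bpass m (u ++ v) = ((bpass m u).1 ++ v, (bpass m u).2) := by
  induction m generalizing u v with
  | zero => simp [bpass]
  | succ m ih =>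
    match u with
    | [] => simp at h
    | [x] => simp at h
    | x :: y :: u' =>
      have hl : m + 2 ≤ u'.length + 2 := by simpa using h
      have h' : m + 1 ≤ (x :: u').length := by simp; omega
      have h'' : m + 1 ≤ (y :: u').length := by simp; omega
      simp only [List.cons_append, bpass]
      split
      · rw [show x :: (u' ++ v) = (x :: u') ++ v from rfl, ih _ _ h']; simp
      · rw [show y :: (u' ++ v) = (y :: u') ++ v from rfl, ih _ _ h'']; simp

-- a pass never crosses a chunk boundary
theorem bpass_chunk (m : Nat) (c rest : List Int) (hc : c ≠ []) (hs : SepC c rest) :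
    bpass m (c ++ rest) =
      ((bpass m c).1 ++ (bpass (m - c.length) rest).1,
       (bpass m c).2 || (bpass (m - c.length) rest).2) := by
  induction m generalizing c rest with
  | zero => simp [bpass]
  | succ m ih =>
    match c, hc with
    | [x], _ =>
      match rest with
      | [] => simp [bpass_single, bpass_nil]
      | b :: t =>
        have hb : cnd x b = false := by
          rcases hs b rfl with h | ⟨a, ha, hd⟩
          · simp [cnd, h]
          · simp only [List.getLast?_singleton, Option.some.injEq] at ha
            simp [cnd, ha ▸ hd]
        simp only [List.singleton_append, bpass, hb, Bool.false_eq_true, if_false,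
          List.length_singleton, Nat.add_sub_cancel]
        simp
    | x :: y :: c', _ =>
      simp only [List.cons_append, bpass]
      by_cases hxy : cnd x y = true
      · have hsep : SepC (x :: c') rest := by
          intro b hb
          rcases hs b hb with h | ⟨a, ha, hd⟩
          · exact Or.inl h
          · cases c' with
            | nil =>
              exfalso
              simp only [List.getLast?_cons_cons, List.getLast?_singleton,
                Option.some.injEq] at ha
              have hy : d3 y = true := by
                have := hxy; simp only [cnd, Bool.and_eq_true] at this; exact this.1.2
              rw [ha] at hy; rw [hy] at hd; simp at hd
            | cons z zs =>
              refine Or.inr ⟨a, ?_, hd⟩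
              simp only [List.getLast?_cons_cons] at ha ⊢
              exact ha
        simp only [if_pos hxy]
        rw [show x :: (c' ++ rest) = (x :: c') ++ rest from rfl, ih _ _ (by simp) hsep]
        simp [List.length_cons, Nat.succ_sub_succ]
      · have hsep : SepC (y :: c') rest := by
          intro b hb
          rcases hs b hb with h | ⟨a, ha, hd⟩
          · exact Or.inl h
          · refine Or.inr ⟨a, ?_, hd⟩
            simp only [List.getLast?_cons_cons] at ha ⊢
            exact ha
        simp only [if_neg hxy]
        rw [show y :: (c' ++ rest) = (y :: c') ++ rest from rfl, ih _ _ (by simp) hsep]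
        simp [List.length_cons, Nat.succ_sub_succ]

theorem good_tail {c : List Int} {cs : List (List Int)} (h : Good (c :: cs)) : Good cs :=
  ⟨fun d hd => h.1 d (List.mem_cons_of_mem _ hd), h.2.tail⟩

theorem sep_of_good {c : List Int} {cs : List (List Int)} (h : Good (c :: cs)) :
    SepC c cs.flatten := by
  intro b hb
  match cs with
  | [] => simp at hb
  | c' :: cs' =>
    have hok' := h.1 c' (by simp)
    have hnb : NB c c' := (List.isChain_cons_cons.mp h.2).1
    have hbc' : b ∈ c' := by
      match c', hok'.1 with
      | z :: zs, _ =>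
        simp only [List.flatten_cons, List.cons_append, List.head?_cons,
          Option.some.injEq] at hb
        simp [← hb]
    rcases hnb with ⟨a, ha, hd⟩ | ⟨a, ha, hd⟩
    · rcases (h.1 c (by simp)).2 with hall | ⟨a0, rfl, hd0⟩
      · rw [hall a ha] at hd; simp at hd
      · exact Or.inr ⟨a0, by simp, hd0⟩
    · rcases hok'.2 with hall | ⟨a0, heq, hd0⟩
      · rw [hall a ha] at hd; simp at hd
      · left
        rw [heq, List.mem_singleton] at hbc'
        rw [heq, List.mem_singleton] at ha
        rw [hbc', ← ha]; exact hd

-- whole-list pass = chunkwise pass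
theorem bpass_flatten (m : Nat) (cs : List (List Int)) (h : Good cs) :
    bpass m cs.flatten = ((cpass m cs).1.flatten, (cpass m cs).2) := by
  induction cs generalizing m with
  | nil => simp [bpass_nil, cpass]
  | cons c cs ih =>
    have hc : c ≠ [] := (h.1 c (by simp)).1
    rw [List.flatten_cons, bpass_chunk m c cs.flatten hc (sep_of_good h),
      ih _ (good_tail h)]
    simp [cpass]

-- full pass on an all-divisible run pushes a maximum of the run to its end
theorem bpass_full_max (t : List Int) : ∀ x : Int, allD3 (x :: t) →
    ∃ w M, (bpass t.length (x :: t)).1 = w ++ [M] ∧ ∀ a ∈ x :: t, a ≤ M := by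
  induction t with
  | nil => exact fun x _ => ⟨[], x, by simp [bpass_single], by simp⟩
  | cons y t' ih =>
    intro x hd3
    have hx : d3 x = true := hd3 x (by simp)
    have hy : d3 y = true := hd3 y (by simp)
    have hcnd : cnd x y = decide (x > y) := by simp [cnd, hx, hy]
    have hsub : ∀ z : Int, d3 z = true → allD3 (z :: t') := by
      intro z hz a ha
      rcases List.mem_cons.1 ha with rfl | ha
      · exact hz
      · exact hd3 a (by simp [ha])
    simp only [List.length_cons, bpass, hcnd]
    by_cases hxy : x > y
    · obtain ⟨w, M, hw, hM⟩ := ih x (hsub x hx)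
      refine ⟨y :: w, M, by simp [hxy, hw], ?_⟩
      intro a ha
      rcases List.mem_cons.1 ha with rfl | ha
      · exact hM a (by simp)
      · rcases List.mem_cons.1 ha with rfl | ha
        · exact le_of_lt (lt_of_lt_of_le hxy (hM x (by simp)))
        · exact hM a (by simp [ha])
    · obtain ⟨w, M, hw, hM⟩ := ih y (hsub y hy)
      refine ⟨x :: w, M, by simp [hxy, hw], ?_⟩
      intro a ha
      rcases List.mem_cons.1 ha with rfl | ha
      · exact le_trans (le_of_not_gt hxy) (hM y (by simp))
      · exact hM a ha

-- no swap within a budget covering the whole run means the run was already sorted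
theorem bpass_noswap (m : Nat) (u : List Int) (hd3 : allD3 u) (hlen : u.length ≤ m + 1)
    (hf : (bpass m u).2 = false) : u.Pairwise (· ≤ ·) ∧ (bpass m u).1 = u := by
  induction m generalizing u with
  | zero =>
    match u, hlen with
    | [], _ => simp [bpass]
    | [x], _ => simp [bpass]
  | succ m ih =>
    match u with
    | [] => simp [bpass]
    | [x] => simp [bpass]
    | x :: y :: t =>
      have hx : d3 x = true := hd3 x (by simp)
      have hy : d3 y = true := hd3 y (by simp)
      have hcnd : cnd x y = decide (x > y) := by simp [cnd, hx, hy]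
      simp only [bpass, hcnd] at hf ⊢
      by_cases hxy : x > y
      · simp [hxy] at hf
      · simp only [hxy, decide_false, Bool.false_eq_true, if_false] at hf ⊢
        have hlen' : (y :: t).length ≤ m + 1 := by simp at hlen ⊢; omega
        have := ih (y :: t) (fun a ha => hd3 a (by simp at ha ⊢; tauto)) hlen' hf
        refine ⟨List.pairwise_cons.2 ⟨?_, this.1⟩, by simp [this.2]⟩
        intro a ha
        rcases List.mem_cons.1 ha with rfl | ha
        · exact le_of_not_gt hxy
        · exact le_trans (le_of_not_gt hxy) ((List.pairwise_cons.1 this.1).1 a ha)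

theorem step_chunk (b : Nat) (c : List Int) (hd3 : allD3 c) (hinv : Inv1 b c) :
    Inv1 (b - 1) (bpass b c).1 ∧ ssort (bpass b c).1 = ssort c ∧
      ((bpass b c).2 = false → c = ssort c ∧ (bpass b c).1 = c) := by
  have hsseq : ssort (bpass b c).1 = ssort c := ssort_perm_eq (bpass_perm b c)
  by_cases hbl : c.length ≤ b
  · have hov := bpass_overflow b c (by omega)
    refine ⟨?_, hsseq, ?_⟩
    · unfold Inv1
      rw [List.take_of_length_le (by rw [bpass_length]; omega),
        List.drop_eq_nil_of_le (by rw [bpass_length]; omega)]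
      simp
    · intro hf
      obtain ⟨hpw, heq⟩ := bpass_noswap b c hd3 (by omega) hf
      exact ⟨(ssort_self hpw).symm, heq⟩
  · -- b + 1 ≤ c.length : split at position b+1
    have hble : b + 1 ≤ c.length := by omega
    set u := c.take (b + 1) with hu
    set v := c.drop (b + 1) with hv
    have hc : c = u ++ v := (List.take_append_drop _ _).symm
    have hul : u.length = b + 1 := by rw [hu, List.length_take]; omega
    have hd3u : allD3 u := fun a ha => hd3 a (List.mem_of_mem_take ha)
    have hsplit : bpass b c = ((bpass b u).1 ++ v, (bpass b u).2) := by
      rw [hc]; exact bpass_split b u v (by omega)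
    have hr : (bpass b c).1 = (bpass b u).1 ++ v := by rw [hsplit]
    have hfl : (bpass b c).2 = (bpass b u).2 := by rw [hsplit]
    have hune : u ≠ [] := by intro h; rw [h] at hul; simp at hul
    obtain ⟨x, t, hxt⟩ : ∃ x t, u = x :: t := by
      match u, hune with | x :: t, _ => exact ⟨x, t, rfl⟩
    have hbt : b = t.length := by rw [hxt] at hul; simp at hul; omega
    obtain ⟨w, M, hw, hM⟩ := bpass_full_max t x (hxt ▸ hd3u)
    have hwfull : (bpass b u).1 = w ++ [M] := by rw [hxt, hbt]; exact hw
    have hwlen : w.length = b := by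
      have := bpass_length b u
      rw [hwfull] at this; simp at this; omega
    have hMu : ∀ a ∈ u, a ≤ M := hxt ▸ hM
    -- key equation: ssort c = ssort w ++ (M :: v)
    have hkey : ssort c = ssort w ++ (M :: v) := by
      have h1 : ssort c = ssort u ++ v := hinv
      have h2 : ssort u = ssort (w ++ [M]) :=
        ssort_perm_eq ((hwfull ▸ bpass_perm b u).symm)
      have h3 : ssort (w ++ [M]) = ssort w ++ [M] := by
        refine ssort_append_max ?_
        intro a ha
        exact hMu a ((bpass_perm b u).mem_iff.1 (hwfull ▸ List.mem_append_left [M] ha))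
      rw [h1, h2, h3]; simp
    have hss2 : ssort ((bpass b u).1 ++ v) = ssort c := by rw [← hr]; exact hsseq
    refine ⟨?_, hsseq, ?_⟩
    · unfold Inv1
      rw [hr, hss2]
      rcases Nat.eq_zero_or_pos b with hb0 | hbpos
      · -- b = 0 : w = []
        have hwnil : w = [] := List.eq_nil_of_length_eq_zero (by omega)
        subst hb0
        rw [hwfull, hwnil]
        simpa [ssort_singleton] using hkey.trans (by rw [hwnil]; simp [ssort]; rfl)
      · have hb1 : b - 1 + 1 = b := by omega
        rw [hb1, hwfull, List.append_assoc,
          List.take_append_of_le_length (by omega), List.take_of_length_le (by omega),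
          List.drop_append_of_le_length (by omega), List.drop_eq_nil_of_le (by omega)]
        simpa using hkey
    · intro hf
      rw [hfl] at hf
      obtain ⟨hpw, hequ⟩ := bpass_noswap b u hd3u (by omega) hf
      have hcs : c = ssort c := by
        rw [hinv, ← hu, ← hv, ssort_self hpw, hc]
      exact ⟨hcs, by rw [hr, hequ, hc]⟩

theorem nb_perm {c₁ c₂ c₁' c₂' : List Int} (h1 : c₁.Perm c₂) (h2 : c₁'.Perm c₂')
    (h : NB c₂ c₂') : NB c₁ c₁' := by
  rcases h with ⟨a, ha, hd⟩ | ⟨a, ha, hd⟩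
  · exact Or.inl ⟨a, h1.mem_iff.2 ha, hd⟩
  · exact Or.inr ⟨a, h2.mem_iff.2 ha, hd⟩

theorem inv1_big (m : Nat) (c : List Int) (h : c.length ≤ m + 1) : Inv1 m c := by
  unfold Inv1
  rw [List.take_of_length_le h, List.drop_eq_nil_of_le h]
  simp

theorem cpass_nil (m : Nat) : cpass m [] = ([], false) := rfl

theorem cpass_cons (m : Nat) (c : List Int) (cs : List (List Int)) :
    cpass m (c :: cs) =
      ((bpass m c).1 :: (cpass (m - c.length) cs).1,
       (bpass m c).2 || (cpass (m - c.length) cs).2) := rfl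

theorem cpass_step (m : Nat) (cs : List (List Int)) (hg : Good cs) (hinv : ChunkInv m cs) :
    ChunkInv (m - 1) (cpass m cs).1 ∧ Good (cpass m cs).1 ∧
      ((cpass m cs).1.map ssort = cs.map ssort) ∧
      ((cpass m cs).2 = false → (cpass m cs).1 = cs ∧ ∀ c ∈ cs, c = ssort c) := by
  induction cs generalizing m with
  | nil => exact ⟨trivial, ⟨by simp [cpass_nil], by simp [cpass_nil]⟩, rfl, fun _ => ⟨rfl, by simp⟩⟩
  | cons c cs ih =>
    obtain ⟨hcne, hcok⟩ := hg.1 c (by simp)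
    obtain ⟨hinv1, hinvt⟩ := hinv
    -- head-chunk step conclusions
    have hhead : Inv1 (m - 1) (bpass m c).1 ∧ ssort (bpass m c).1 = ssort c ∧
        ((bpass m c).2 = false → c = ssort c ∧ (bpass m c).1 = c) := by
      rcases hcok with hall | ⟨a, rfl, hd⟩
      · exact step_chunk m c hall hinv1
      · refine ⟨inv1_big _ _ (by rw [bpass_single]; show 1 ≤ m - 1 + 1; omega),
          ssort_perm_eq (bpass_perm m [a]),
          fun _ => ⟨(ssort_singleton a).symm, by rw [bpass_single]⟩⟩
    obtain ⟨hI, hS, hF⟩ := hhead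
    have hlen : (bpass m c).1.length = c.length := bpass_length m c
    obtain ⟨ihI, ihG, ihM, ihF⟩ := ih (m - c.length) (good_tail hg) hinvt
    refine ⟨⟨hI, ?_⟩, ⟨?_, ?_⟩, ?_, ?_⟩
    · -- tail invariant at budget (m-1) - len
      rw [hlen, Nat.sub_right_comm]
      exact ihI
    · -- okC everywhere
      intro d hd
      rcases List.mem_cons.1 hd with rfl | hd
      · refine ⟨by intro h; have := hlen; rw [h] at this; simp at this; exact hcne (List.eq_nil_of_length_eq_zero this.symm), ?_⟩
        rcases hcok with hall | ⟨a, rfl, hda⟩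
        · exact Or.inl fun a ha => hall a ((bpass_perm m c).mem_iff.1 ha)
        · exact Or.inr ⟨a, by simp [bpass_single], hda⟩
      · exact ihG.1 d hd
    · -- chain
      rw [cpass_cons]
      refine List.isChain_cons.2 ⟨?_, ihG.2⟩
      intro y hy
      match cs, hy with
      | c' :: cs', hy =>
        simp only [cpass_cons, List.head?_cons, Option.mem_def, Option.some.injEq] at hy
        subst hy
        exact nb_perm (bpass_perm m c) (bpass_perm (m - c.length) c')
          (List.isChain_cons_cons.mp hg.2).1
    · simp only [cpass, List.map_cons]
      rw [hS, ihM]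
    · intro hf
      simp only [cpass, Bool.or_eq_false_iff] at hf
      obtain ⟨hcs, hall⟩ := ihF hf.2
      obtain ⟨hcss, hcr⟩ := hF hf.1
      refine ⟨by simp only [cpass]; rw [hcr, hcs], ?_⟩
      intro d hd
      rcases List.mem_cons.1 hd with rfl | hd
      · exact hcss
      · exact hall d hd

theorem loopB_succ (k : Nat) (xs : List Int) :
    loopB (k + 1) xs = if (bpass k xs).2 then loopB k (bpass k xs).1 else (bpass k xs).1 := rfl

theorem chunkinv_zero (cs : List (List Int)) (h : ChunkInv 0 cs) : ∀ c ∈ cs, ssort c = c := by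
  induction cs with
  | nil => simp
  | cons c cs ih =>
    intro d hd
    obtain ⟨h1, h2⟩ := h
    rcases List.mem_cons.1 hd with rfl | hd
    · unfold Inv1 at h1
      match d with
      | [] => simp [ssort]; rfl
      | x :: t => rw [h1]; simp [ssort_singleton]
    · exact ih (by simpa using h2) d hd

theorem main_loop (k : Nat) (cs : List (List Int)) (hg : Good cs) (hinv : ChunkInv k cs) :
    loopB (k + 1) cs.flatten = (cs.map ssort).flatten := by
  induction k generalizing cs with
  | zero =>
    have hzero := chunkinv_zero cs hinv
    have hmap : cs.map ssort = cs := by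
      rw [List.map_congr_left (fun c hc => hzero c hc), List.map_id']
    rw [hmap, loopB_succ]
    simp [bpass]
  | succ k ih =>
    have hbp := bpass_flatten (k + 1) cs hg
    obtain ⟨hI, hG, hM, hF⟩ := cpass_step (k + 1) cs hg hinv
    rw [loopB_succ, hbp]
    by_cases hf : (cpass (k + 1) cs).2 = true
    · rw [if_pos hf]
      rw [ih (cpass (k + 1) cs).1 hG (by simpa using hI), hM]
    · rw [if_neg hf]
      obtain ⟨hid, hall⟩ := hF (by simpa using hf)
      rw [hid, List.map_congr_left (fun c hc => (hall c hc).symm), List.map_id']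

-- the index-based inner loop is the structural pass
theorem getD_append_len (pre : List Int) (x : Int) (l : List Int) :
    (pre ++ x :: l).getD pre.length 0 = x := by
  rw [List.getD_eq_getElem?_getD, List.getElem?_append_right (le_refl _)]
  simp

theorem getD_append_len1 (pre : List Int) (x y : Int) (l : List Int) :
    (pre ++ x :: y :: l).getD (pre.length + 1) 0 = y := by
  rw [List.getD_eq_getElem?_getD, List.getElem?_append_right (by omega)]
  simp

theorem set_append_len (pre l : List Int) (v : Int) :
    (pre ++ l).set pre.length v = pre ++ l.set 0 v := by
  rw [List.set_append_right _ _ (le_refl _)]; simp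

theorem set_append_len1 (pre l : List Int) (v : Int) :
    (pre ++ l).set (pre.length + 1) v = pre ++ l.set 1 v := by
  rw [List.set_append_right _ _ (by omega)]; simp

theorem inner_eq_bpass (m : Nat) (pre xs : List Int) (sw : Bool) (h : m + 1 ≤ xs.length) :
    (List.range' pre.length m).foldl stepA (pre ++ xs, sw) =
      (pre ++ (bpass m xs).1, sw || (bpass m xs).2) := by
  induction m generalizing pre xs sw with
  | zero => simp [bpass]
  | succ m ih =>
    match xs with
    | [] => simp at h
    | [x] => simp at h
    | x :: y :: t =>
      have hl : m + 1 ≤ t.length + 1 := by simp at h; omega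
      rw [List.range'_succ, List.foldl_cons]
      have hstep : stepA (pre ++ x :: y :: t, sw) pre.length =
          if cnd x y then (pre ++ y :: x :: t, true) else (pre ++ x :: y :: t, sw) := by
        simp only [stepA, getD_append_len, getD_append_len1]
        split
        · rw [set_append_len, set_append_len1]; rfl
        · rfl
      rw [hstep]
      simp only [bpass]
      by_cases hxy : cnd x y = true
      · rw [if_pos hxy, if_pos hxy]
        have := ih (pre ++ [y]) (x :: t) true (by simpa using hl)
        rw [show pre ++ y :: x :: t = (pre ++ [y]) ++ x :: t by simp, show pre.length + 1 = (pre ++ [y]).length by simp, this]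
        simp
      · rw [if_neg hxy, if_neg (by simpa using hxy)]
        have := ih (pre ++ [x]) (y :: t) sw (by simpa using hl)
        rw [show pre ++ x :: y :: t = (pre ++ [x]) ++ y :: t by simp, show pre.length + 1 = (pre ++ [x]).length by simp, this]
        simp

theorem outer_eq_loopB (k : Nat) (xs : List Int) (h : k ≤ xs.length) :
    outerA k xs = loopB k xs := by
  induction k generalizing xs with
  | zero => rfl
  | succ k ih =>
    have hinner : innerA xs k = ((bpass k xs).1, (bpass k xs).2) := by
      unfold innerA
      rw [List.range_eq_range']
      have := inner_eq_bpass k ([] : List Int) xs false h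
      simpa using this
    simp only [outerA, loopB, hinner]
    split
    · exact ih _ (by rw [bpass_length]; omega)
    · rfl

theorem chunks_flatten (xs : List Int) : (chunks xs).flatten = xs := by
  induction xs using chunks.induct with
  | case1 => simp [chunks]
  | case2 x t hx ih =>
    rw [chunks, if_pos hx]
    simp [ih, List.takeWhile_append_dropWhile]
  | case3 x t hx ih =>
    rw [chunks, if_neg (by simp [hx])]
    simp [ih]

theorem chunks_head (ys : List Int) (c : List Int) (cs : List (List Int))
    (h : chunks ys = c :: cs) : c.head? = ys.head? := by
  match ys with
  | [] => simp [chunks] at h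
  | y :: t =>
    rw [chunks] at h
    split at h <;> (cases h; simp)

theorem chunks_good (xs : List Int) : Good (chunks xs) := by
  induction xs using chunks.induct with
  | case1 => exact ⟨by simp [chunks], by simp [chunks]⟩
  | case2 x t hx ih =>
    rw [chunks, if_pos hx]
    have hok : okC (x :: t.takeWhile d3) := by
      refine ⟨by simp, Or.inl ?_⟩
      intro a ha
      rcases List.mem_cons.1 ha with rfl | ha
      · exact hx
      · exact List.mem_takeWhile_imp ha
    refine ⟨?_, ?_⟩
    · intro d hd
      rcases List.mem_cons.1 hd with rfl | hd
      · exact hok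
      · exact ih.1 d hd
    · refine List.isChain_cons.2 ⟨?_, ih.2⟩
      intro y hy
      match hch : chunks (t.dropWhile d3), hy with
      | c :: cs', hy =>
        simp only [List.head?_cons, Option.mem_def, Option.some.injEq] at hy
        subst hy
        have hdne : t.dropWhile d3 ≠ [] := by
          intro hnil; rw [hnil] at hch; simp [chunks] at hch
        have hhd : c.head? = (t.dropWhile d3).head? := chunks_head _ _ _ hch
        match hdr : t.dropWhile d3, hdne with
        | z :: zs, _ =>
          have hz : d3 z = false := by
            have := List.head_dropWhile_not d3 (l := t) (by rw [hdr]; simp)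
            rw [show (t.dropWhile d3).head (by rw [hdr]; simp) = z by simp [hdr]] at this
            exact this
          rw [hdr] at hhd
          refine Or.inr ⟨z, ?_, hz⟩
          have : c.head? = some z := by simpa using hhd
          match c with
          | [] => simp at this
          | w :: ws => simp at this; simp [this]
  | case3 x t hx ih =>
    rw [chunks, if_neg (by simp [hx])]
    refine ⟨?_, ?_⟩
    · intro d hd
      rcases List.mem_cons.1 hd with rfl | hd
      · exact ⟨by simp, Or.inr ⟨x, rfl, by simpa using hx⟩⟩
      · exact ih.1 d hd
    · refine List.isChain_cons.2 ⟨?_, ih.2⟩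
      intro y _
      exact Or.inl ⟨x, by simp, by simpa using hx⟩

theorem alt_eq_SR (xs : List Int) : mutant24_alt xs = ((chunks xs).map ssort).flatten := by
  induction xs using chunks.induct with
  | case1 => simp [mutant24_alt, chunks]
  | case2 x t hx ih =>
    rw [mutant24_alt, chunks, if_pos hx, if_pos hx]
    simp only [List.map_cons, List.flatten_cons, ih]
    rfl
  | case3 x t hx ih =>
    rw [mutant24_alt, chunks, if_neg (by simp [hx]), if_neg (by simp [hx])]
    simp [ih, ssort_singleton]

theorem chunkinv_init (m : Nat) (cs : List (List Int)) (hne : ∀ c ∈ cs, c ≠ [])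
    (h : cs.flatten.length ≤ m + 1) : ChunkInv m cs := by
  induction cs generalizing m with
  | nil => trivial
  | cons c cs ih =>
    simp only [List.flatten_cons, List.length_append] at h
    have hc1 : 1 ≤ c.length := List.length_pos_iff.2 (hne c (by simp))
    refine ⟨inv1_big _ _ (by omega), ih _ (fun d hd => hne d (by simp [hd])) (by omega)⟩

-- ===== VERDICT (by name: the statement is the Claim_ definition above) =====
theorem mutant24_spec : Claim_equal_mutant24 := by
  intro arr _
  unfold Spec_mutant24 mutant24
  rw [outer_eq_loopB _ _ (le_refl _), alt_eq_SR]
  match arr with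
  | [] => simp [chunks, loopB]
  | x :: t =>
    have h1 := chunks_flatten (x :: t)
    have h2 := chunks_good (x :: t)
    have h3 : ((x :: t).length - 1) + 1 = (x :: t).length := by simp
    have hm := main_loop ((x :: t).length - 1) (chunks (x :: t)) h2
      (chunkinv_init _ _ (fun c hc => (h2.1 c hc).1) (by rw [h1, h3]))
    rw [h3, h1] at hm
    exact hm
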